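-- pv_equiv track=rewrite | github.com/SabinAdhikarii/Dristi-AI-Smart-Traffic-Monitoring-System | src/main_processor.py | _dedup_violations
-- ===== SOURCE A (Python) =====
-- def _dedup_violations(violation_list, frame_window=30, x_tolerance=160):
--     if not violation_list:
--         return violation_list
--
--     sorted_v = sorted(violation_list, key=lambda v: v.get('frame', 0))
--     kept = []
--
--     for candidate in sorted_v:
--         c_frame = candidate.get('frame', 0)
--         c_track = candidate.get('track_id')
--         is_duplicate = False
--
--         for kept_v in kept:
--             k_frame = kept_v.get('frame', 0)
--             k_track = kept_v.get('track_id')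
--
--             if c_track and k_track and c_track == k_track:
--                 is_duplicate = True
--                 break
--
--             if abs(c_frame - k_frame) <= frame_window:
--                 is_duplicate = True
--                 break
--
--         if not is_duplicate:
--             kept.append(candidate)
--
--     return kept
-- ===== SOURCE B (Python) =====
-- def _dedup_violations(violation_list, frame_window=30, x_tolerance=160):
--     # Single pass over the frame-sorted list: a set of already-kept truthy
--     # track_ids replaces the inner scan's track comparison, and (because kept
--     # frames are ascending) comparing against the LAST kept frame alone
--     # replaces the inner scan's |c_frame - k_frame| <= frame_window check.
--     if not violation_list:
--         return violation_list
--
--     kept = []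
--     seen_tracks = set()
--     last_frame = None
--     for v in sorted(violation_list, key=lambda d: d.get('frame', 0)):
--         t = v.get('track_id')
--         if t and t in seen_tracks:
--             continue
--         f = v.get('frame', 0)
--         if last_frame is not None and f - last_frame <= frame_window:
--             continue
--         kept.append(v)
--         if t:
--             seen_tracks.add(t)
--         last_frame = f
--     return kept
-- ===== Notes on version B (the rewrite author's own statement) =====
-- stated objective: alternative
-- what changed: Replaces the inner scan over all kept violations with a single pass over the frame-sorted list maintaining a set of kept truthy track_ids and the last kept frame (valid because kept frames are ascending, so the nearest kept frame is the last one); worst-case cost drops from O(n^2) to O(n log n) but the measured timing shows no speedup since A's inner scan usually breaks on its first element.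
import Mathlib
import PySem

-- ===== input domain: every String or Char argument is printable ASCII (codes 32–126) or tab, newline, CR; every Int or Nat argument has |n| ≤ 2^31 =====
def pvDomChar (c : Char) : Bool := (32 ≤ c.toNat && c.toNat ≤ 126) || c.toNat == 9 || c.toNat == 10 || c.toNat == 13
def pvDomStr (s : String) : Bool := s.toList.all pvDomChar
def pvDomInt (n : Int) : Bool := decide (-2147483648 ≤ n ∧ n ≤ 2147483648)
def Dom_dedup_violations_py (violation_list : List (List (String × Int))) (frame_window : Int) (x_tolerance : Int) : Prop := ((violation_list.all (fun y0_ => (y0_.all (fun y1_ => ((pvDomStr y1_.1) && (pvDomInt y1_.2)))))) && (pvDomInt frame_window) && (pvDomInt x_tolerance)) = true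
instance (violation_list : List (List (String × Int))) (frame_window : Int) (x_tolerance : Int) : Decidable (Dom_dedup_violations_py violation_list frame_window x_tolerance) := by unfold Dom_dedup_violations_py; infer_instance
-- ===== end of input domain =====

-- B replaces A's inner scan over all kept violations by a set of kept truthy track_ids
-- and the last kept frame, in one pass over the frame-sorted list.

-- shared primitives: dict lookups (first match, as Python's dict.get) and int truthiness
def pvGet? (d : List (String × Int)) (k : String) : Option Int := (PySem.Dict.mk d).get? k
def pvGetD (d : List (String × Int)) (k : String) (dflt : Int) : Int := (PySem.Dict.mk d).getD k dflt
def pvTruthy : Option Int → Bool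
  | none => false
  | some v => v != 0

-- ===== PORT A =====
-- inner 'for kept_v in kept' loop with its two break conditions
def pvDupScan (c_frame : Int) (c_track : Option Int) (frame_window : Int) :
    List (List (String × Int)) → Bool
  | [] => false
  | kept_v :: rest =>
    let k_frame := pvGetD kept_v "frame" 0
    let k_track := pvGet? kept_v "track_id"
    if pvTruthy c_track && pvTruthy k_track && (c_track == k_track) then true
    else if |c_frame - k_frame| ≤ frame_window then true
    else pvDupScan c_frame c_track frame_window rest

-- outer 'for candidate in sorted_v' loop accumulating kept
def pvKeepLoop (frame_window : Int) (kept : List (List (String × Int))) :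
    List (List (String × Int)) → List (List (String × Int))
  | [] => kept
  | candidate :: rest =>
    let c_frame := pvGetD candidate "frame" 0
    let c_track := pvGet? candidate "track_id"
    if pvDupScan c_frame c_track frame_window kept then
      pvKeepLoop frame_window kept rest
    else
      pvKeepLoop frame_window (kept ++ [candidate]) rest

def dedup_violations_py (violation_list : List (List (String × Int))) (frame_window : Int) (x_tolerance : Int) : List (List (String × Int)) :=
  if violation_list = [] then violation_list
  else pvKeepLoop frame_window []
    (PySem.List.sorted violation_list (fun v => pvGetD v "frame" 0) false)

-- ===== PORT B =====
-- single pass: seen = set of kept truthy track_ids, last = frame of the last kept violation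
def pvAltLoop (frame_window : Int) (kept : List (List (String × Int)))
    (seen : PySem.Set Int) (last : Option Int) :
    List (List (String × Int)) → List (List (String × Int))
  | [] => kept
  | v :: rest =>
    let t := pvGet? v "track_id"
    -- 'if t and t in seen_tracks' (when t is truthy it is 'some a' and t.getD 0 = a)
    if pvTruthy t && PySem.Set.contains seen (t.getD 0) then
      pvAltLoop frame_window kept seen last rest
    else
      let f := pvGetD v "frame" 0
      -- 'if last_frame is not None and f - last_frame <= frame_window'
      if last.elim false (fun l => decide (f - l ≤ frame_window)) then
        pvAltLoop frame_window kept seen last rest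
      else
        pvAltLoop frame_window (kept ++ [v])
          (if pvTruthy t then PySem.Set.add seen (t.getD 0) else seen) (some f) rest

def dedup_violations_py_alt (violation_list : List (List (String × Int))) (frame_window : Int) (x_tolerance : Int) : List (List (String × Int)) :=
  if violation_list = [] then violation_list
  else pvAltLoop frame_window [] PySem.Set.empty none
    (PySem.List.sorted violation_list (fun v => pvGetD v "frame" 0) false)

-- ===== PRECONDITION & SPEC =====
def Spec_dedup_violations_py (violation_list : List (List (String × Int))) (frame_window : Int) (x_tolerance : Int) (out : List (List (String × Int))) : Prop := out = dedup_violations_py_alt violation_list frame_window x_tolerance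
instance (violation_list : List (List (String × Int))) (frame_window : Int) (x_tolerance : Int) (out : List (List (String × Int))) : Decidable (Spec_dedup_violations_py violation_list frame_window x_tolerance out) := by unfold Spec_dedup_violations_py; infer_instance

-- ===== CLAIM (what is proved, stated in full; the proofs are below) =====
def Claim_equal_dedup_violations_py : Prop := ∀ (violation_list : List (List (String × Int))) (frame_window : Int) (x_tolerance : Int), Dom_dedup_violations_py violation_list frame_window x_tolerance → Spec_dedup_violations_py violation_list frame_window x_tolerance (dedup_violations_py violation_list frame_window x_tolerance)

-- ===== LEMMAS AND PROOFS =====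

-- A's inner scan with break is an 'any' over kept
lemma pvDupScan_eq_any (c_frame : Int) (c_track : Option Int) (W : Int)
    (kept : List (List (String × Int))) :
    pvDupScan c_frame c_track W kept =
      kept.any (fun k =>
        (pvTruthy c_track && pvTruthy (pvGet? k "track_id") && (c_track == pvGet? k "track_id"))
        || decide (|c_frame - pvGetD k "frame" 0| ≤ W)) := by
  induction kept with
  | nil => rfl
  | cons k rest ih =>
    simp only [pvDupScan, List.any_cons]
    by_cases h1 : (pvTruthy c_track && pvTruthy (pvGet? k "track_id") && (c_track == pvGet? k "track_id")) = true
    · simp [h1]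
    · by_cases h2 : |c_frame - pvGetD k "frame" 0| ≤ W
      · simp [h1, h2]
      · simp [h1, h2, ih]

-- main invariant: on a frame-sorted suffix, A's loop and B's loop agree
lemma loops_eq (W : Int) (s kept : List (List (String × Int)))
    (seen : PySem.Set Int) (last : Option Int)
    (hps : s.Pairwise (fun a b => pvGetD a "frame" 0 ≤ pvGetD b "frame" 0))
    (hks : ∀ k ∈ kept, ∀ c ∈ s, pvGetD k "frame" 0 ≤ pvGetD c "frame" 0)
    (hseen : ∀ a : Int, a ∈ seen ↔ (a ≠ 0 ∧ ∃ k ∈ kept, pvGet? k "track_id" = some a))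
    (hlast_none : last = none → kept = [])
    (hlast_some : ∀ l, last = some l →
      (∃ k ∈ kept, pvGetD k "frame" 0 = l) ∧ ∀ k ∈ kept, pvGetD k "frame" 0 ≤ l) :
    pvKeepLoop W kept s = pvAltLoop W kept seen last s := by
  induction s generalizing kept seen last with
  | nil => rfl
  | cons c rest ih =>
    have hhead : ∀ c' ∈ rest, pvGetD c "frame" 0 ≤ pvGetD c' "frame" 0 :=
      (List.pairwise_cons.mp hps).1
    have hrest : rest.Pairwise (fun a b => pvGetD a "frame" 0 ≤ pvGetD b "frame" 0) :=
      (List.pairwise_cons.mp hps).2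
    have hksr : ∀ k ∈ kept, ∀ c' ∈ rest, pvGetD k "frame" 0 ≤ pvGetD c' "frame" 0 :=
      fun k hk c' hc' => hks k hk c' (List.mem_cons_of_mem _ hc')
    have hkc : ∀ k ∈ kept, pvGetD k "frame" 0 ≤ pvGetD c "frame" 0 :=
      fun k hk => hks k hk c (List.mem_cons_self ..)
    -- the two duplicate tests agree
    have hdup : pvDupScan (pvGetD c "frame" 0) (pvGet? c "track_id") W kept =
        ((pvTruthy (pvGet? c "track_id") &&
            PySem.Set.contains seen ((pvGet? c "track_id").getD 0))
         || last.elim false (fun l => decide (pvGetD c "frame" 0 - l ≤ W))) := by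
      rw [pvDupScan_eq_any]
      rcases hex : kept.any (fun k =>
        (pvTruthy (pvGet? c "track_id") && pvTruthy (pvGet? k "track_id") && (pvGet? c "track_id" == pvGet? k "track_id"))
        || decide (|pvGetD c "frame" 0 - pvGetD k "frame" 0| ≤ W)) with _ | _
      · -- any is false: both disjuncts of B are false
        rw [List.any_eq_false] at hex
        symm
        rw [Bool.or_eq_false_iff]
        constructor
        · -- track part
          cases ht : pvGet? c "track_id" with
          | none => simp [pvTruthy]
          | some a =>
            by_cases ha : a = 0
            · simp [pvTruthy, ha]
            · rw [Bool.and_eq_false_iff]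
              right
              rw [Bool.eq_false_iff]
              intro hcon
              rw [Option.getD_some] at hcon
              have hmem := (hseen a).mp ((PySem.Set.contains_iff seen a).mp hcon)
              obtain ⟨-, k, hk, hka⟩ := hmem
              have := Bool.eq_false_iff.mpr (hex k hk)
              rw [Bool.or_eq_false_iff, Bool.and_eq_false_iff] at this
              rcases this.1 with h | h
              · rcases Bool.and_eq_false_iff.mp h with h' | h'
                · simp [pvTruthy, ht, ha] at h'
                · simp [pvTruthy, hka, ha] at h'
              · simp [ht, hka] at h
        · -- frame part
          cases last with
          | none => rfl
          | some l =>
            obtain ⟨⟨k0, hk0, hfk0⟩, -⟩ := hlast_some l rfl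
            have := Bool.eq_false_iff.mpr (hex k0 hk0)
            rw [Bool.or_eq_false_iff] at this
            have hle := hkc k0 hk0
            simp only [Option.elim]
            rw [decide_eq_false_iff_not] at this ⊢
            intro hcon
            exact this.2 (by rw [hfk0, abs_of_nonneg (by omega)]; omega)
      · -- any is true: some disjunct of B is true
        rw [List.any_eq_true] at hex
        obtain ⟨k, hk, hcond⟩ := hex
        rw [Bool.or_eq_true] at hcond
        symm
        rw [Bool.or_eq_true]
        rcases hcond with h | h
        · left
          simp only [Bool.and_eq_true] at h
          obtain ⟨⟨hct, hkt⟩, heq⟩ := h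
          cases ht : pvGet? c "track_id" with
          | none => rw [ht] at hct; simp [pvTruthy] at hct
          | some a =>
            rw [ht] at hct heq
            have ha : a ≠ 0 := by simpa [pvTruthy] using hct
            cases hkt' : pvGet? k "track_id" with
            | none => rw [hkt'] at heq; simp at heq
            | some b =>
              rw [hkt'] at heq
              have hab : a = b := by simpa using heq
              simp only [pvTruthy, Option.getD_some]
              rw [Bool.and_eq_true]
              refine ⟨by simpa using ha, ?_⟩
              rw [PySem.Set.contains_iff]
              exact (hseen a).mpr ⟨ha, k, hk, by rw [hkt', hab]⟩
        · right
          cases last with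
          | none =>
            rw [hlast_none rfl] at hk
            simp at hk
          | some l =>
            obtain ⟨-, hmax⟩ := hlast_some l rfl
            rw [decide_eq_true_iff] at h
            have h1 := hkc k hk
            have h2 := hmax k hk
            rw [abs_of_nonneg (by omega)] at h
            simp only [Option.elim, decide_eq_true_iff]
            omega
    obtain ⟨tB, htB⟩ : ∃ b : Bool, (pvTruthy (pvGet? c "track_id") &&
        PySem.Set.contains seen ((pvGet? c "track_id").getD 0)) = b := ⟨_, rfl⟩
    obtain ⟨fB, hfB⟩ : ∃ b : Bool,
        (last.elim false (fun l => decide (pvGetD c "frame" 0 - l ≤ W))) = b := ⟨_, rfl⟩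
    rw [htB, hfB] at hdup
    simp only [pvKeepLoop, pvAltLoop, htB, hfB, hdup]
    cases tB with
    | true =>
      simp only [Bool.true_or, if_true]
      exact ih _ _ _ hrest hksr hseen hlast_none hlast_some
    | false =>
      cases fB with
      | true =>
        simp only [Bool.false_or, if_true]
        exact ih _ _ _ hrest hksr hseen hlast_none hlast_some
      | false =>
        simp only [Bool.false_or]
        apply ih _ _ _ hrest
        · intro k hk c' hc'
          rcases List.mem_append.mp hk with hk | hk
          · exact hksr k hk c' hc'
          · rw [List.mem_singleton.mp hk]; exact hhead c' hc'
        · intro a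
          constructor
          · intro hmem
            by_cases htr : pvTruthy (pvGet? c "track_id") = true
            · rw [if_pos htr] at hmem
              rcases (PySem.Set.mem_add _ _ _).mp hmem with hmem | hmem
              · obtain ⟨ha, k, hk, hka⟩ := (hseen a).mp hmem
                exact ⟨ha, k, List.mem_append_left _ hk, hka⟩
              · cases hct : pvGet? c "track_id" with
                | none => rw [hct] at htr; simp [pvTruthy] at htr
                | some b =>
                  rw [hct] at htr hmem
                  have hb : b ≠ 0 := by simpa [pvTruthy] using htr
                  simp only [Option.getD_some] at hmem
                  subst hmem
                  exact ⟨hb, c, List.mem_append_right _ (List.mem_singleton_self _), hct⟩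
            · rw [if_neg htr] at hmem
              obtain ⟨ha, k, hk, hka⟩ := (hseen a).mp hmem
              exact ⟨ha, k, List.mem_append_left _ hk, hka⟩
          · rintro ⟨ha, k, hk, hka⟩
            rcases List.mem_append.mp hk with hk | hk
            · have : a ∈ seen := (hseen a).mpr ⟨ha, k, hk, hka⟩
              split_ifs with htr
              · exact (PySem.Set.mem_add _ _ _).mpr (Or.inl this)
              · exact this
            · rw [List.mem_singleton.mp hk] at hka
              have htr : pvTruthy (pvGet? c "track_id") = true := by
                rw [hka]; simpa [pvTruthy] using ha
              rw [if_pos htr]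
              exact (PySem.Set.mem_add _ _ _).mpr (Or.inr (by rw [hka, Option.getD_some]))
        · intro h; cases h
        · intro l hl
          injection hl with hl
          subst hl
          exact ⟨⟨c, List.mem_append_right _ (List.mem_singleton_self _), rfl⟩,
            fun k hk => by
              rcases List.mem_append.mp hk with hk | hk
              · exact hkc k hk
              · rw [List.mem_singleton.mp hk]⟩

-- ===== VERDICT (by name: the statement is the Claim_ definition above) =====
theorem dedup_violations_py_spec : Claim_equal_dedup_violations_py := by
  intro vl W X _
  unfold Spec_dedup_violations_py dedup_violations_py dedup_violations_py_alt
  by_cases h : vl = []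
  · simp [h]
  · rw [if_neg h, if_neg h]
    apply loops_eq
    · exact PySem.List.sorted_pairwise vl (fun v => pvGetD v "frame" 0)
    · intro k hk; simp at hk
    · intro a
      constructor
      · intro hmem; simp [PySem.Set.empty] at hmem
      · rintro ⟨-, k, hk, -⟩; simp at hk
    · intro _; rfl
    · intro l hl; cases hl
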